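-- pv_equiv track=rewrite | github.com/FrankCasanova/Python | Funciones/270.py | positionMaxLenSerie
-- ===== SOURCE A (Python) =====
-- def positionMaxLenSerie(l):
--
--     position = 0
--     maximCounts = 0
--     test = []
--
--     for index, target in enumerate(l):
--
--         if target not in test:
--             test.append(target)
--
--             if l.count(target) > maximCounts:
--                 maximCounts = l.count(target)
--                 position = index
--     return position
-- ===== SOURCE B (Python) =====
-- def positionMaxLenSerie(l):
--     counts = {}
--     for x in l:
--         counts[x] = counts.get(x, 0) + 1
--     maxc = 0
--     for x in l:
--         if counts[x] > maxc:
--             maxc = counts[x]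
--     for index, target in enumerate(l):
--         if counts[target] == maxc:
--             return index
--     return 0
-- ===== Notes on version B (the rewrite author's own statement) =====
-- stated objective: faster
-- what changed: B builds a frequency table in one pass, takes the maximum count, and returns the first index whose element reaches it, instead of A's repeated l.count scans per distinct element.
import Mathlib
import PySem

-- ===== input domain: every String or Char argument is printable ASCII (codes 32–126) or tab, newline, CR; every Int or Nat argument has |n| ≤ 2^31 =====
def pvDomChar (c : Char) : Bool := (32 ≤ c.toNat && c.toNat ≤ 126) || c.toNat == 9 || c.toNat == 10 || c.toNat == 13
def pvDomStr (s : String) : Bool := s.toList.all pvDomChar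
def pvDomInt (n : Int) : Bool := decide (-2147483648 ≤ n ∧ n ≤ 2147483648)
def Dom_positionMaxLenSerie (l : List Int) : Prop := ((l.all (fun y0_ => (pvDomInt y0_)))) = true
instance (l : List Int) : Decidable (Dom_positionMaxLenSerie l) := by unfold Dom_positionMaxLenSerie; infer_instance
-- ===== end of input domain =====

-- B replaces A's per-distinct-element l.count rescans with one counting pass, a max pass, and one
-- forward scan for the first index reaching the max (objective: faster, O(n^2) -> O(n)).

-- ===== PORT A =====
def positionMaxLenSerie (l : List Int) : Int :=
  ((PySem.List.enumerate l).foldl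
    (fun (st : Int × Int × List Int) (p : Int × Int) =>
      if p.2 ∈ st.2.2 then st
      else
        if (PySem.List.count l p.2 : Int) > st.2.1 then
          (p.1, (PySem.List.count l p.2 : Int), st.2.2 ++ [p.2])
        else (st.1, st.2.1, st.2.2 ++ [p.2]))
    (0, 0, [])).1

-- ===== PORT B =====
-- the third loop of Source B ('return index' on first hit, 0 on fall-through)
def pvScanFirst (counts : PySem.Dict Int Int) (maxc : Int) : List (Int × Int) → Int
  | [] => 0
  | p :: rest => if counts.getD p.2 0 == maxc then p.1 else pvScanFirst counts maxc rest

def positionMaxLenSerie_alt (l : List Int) : Int :=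
  let counts := l.foldl (fun d x => d.insert x (d.getD x 0 + 1)) PySem.Dict.empty
  let maxc := l.foldl (fun m x => if counts.getD x 0 > m then counts.getD x 0 else m) (0 : Int)
  pvScanFirst counts maxc (PySem.List.enumerate l)

-- ===== PRECONDITION & SPEC =====
def Spec_positionMaxLenSerie (l : List Int) (out : Int) : Prop := out = positionMaxLenSerie_alt l
instance (l : List Int) (out : Int) : Decidable (Spec_positionMaxLenSerie l out) := by unfold Spec_positionMaxLenSerie; infer_instance

-- ===== CLAIM (what is proved, stated in full; the proofs are below) =====
def Claim_equal_positionMaxLenSerie : Prop := ∀ (l : List Int), Dom_positionMaxLenSerie l → Spec_positionMaxLenSerie l (positionMaxLenSerie l)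

-- ===== LEMMAS AND PROOFS =====

-- count of x in l, as Int
def pvCnt (l : List Int) (x : Int) : Int := (PySem.List.count l x : Int)

-- A's loop with the redundant 'test' membership removed
def pvFold2 (l : List Int) (ps : List (Int × Int)) (st : Int × Int) : Int × Int :=
  ps.foldl (fun st p => if pvCnt l p.2 > st.2 then (p.1, pvCnt l p.2) else st) st

-- B's max pass, over a pair list
def pvMaxF (l : List Int) (ps : List (Int × Int)) (m : Int) : Int :=
  ps.foldl (fun m p => if pvCnt l p.2 > m then pvCnt l p.2 else m) m

-- B's scan with counts already rewritten to pvCnt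
def pvFind (l : List Int) (m : Int) : List (Int × Int) → Int
  | [] => 0
  | p :: rest => if pvCnt l p.2 = m then p.1 else pvFind l m rest

lemma pvScanFirst_eq_pvFind (l : List Int) (m : Int) (ps : List (Int × Int)) :
    pvScanFirst (l.foldl (fun d x => d.insert x (d.getD x 0 + 1)) PySem.Dict.empty) m ps
      = pvFind l m ps := by
  induction ps with
  | nil => rfl
  | cons p rest ih =>
      simp [pvScanFirst, pvFind, PySem.Dict.getD_foldl_insert_add_one, pvCnt, ih,
        PySem.List.count_eq]

lemma pvMaxF_le (l : List Int) (ps : List (Int × Int)) (m : Int) : m ≤ pvMaxF l ps m := by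
  induction ps generalizing m with
  | nil => simp [pvMaxF]
  | cons p rest ih =>
      simp only [pvMaxF, List.foldl_cons]
      split_ifs with h
      · exact le_trans (le_of_lt h) (ih _)
      · exact ih m

-- the test list never changes the result: everything in it has count ≤ maximCounts
lemma pvTestElim (l : List Int) (ps : List (Int × Int)) :
    ∀ (p m : Int) (test : List Int), (∀ x ∈ test, pvCnt l x ≤ m) →
    (ps.foldl
      (fun (st : Int × Int × List Int) (q : Int × Int) =>
        if q.2 ∈ st.2.2 then st
        else
          if (PySem.List.count l q.2 : Int) > st.2.1 then
            (q.1, (PySem.List.count l q.2 : Int), st.2.2 ++ [q.2])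
          else (st.1, st.2.1, st.2.2 ++ [q.2]))
      (p, m, test)).1 = (pvFold2 l ps (p, m)).1 := by
  induction ps with
  | nil => intro p m test _; rfl
  | cons q rest ih =>
      intro p m test hinv
      simp only [pvCnt] at hinv
      simp only [List.foldl_cons, pvFold2, pvCnt] at ih ⊢
      by_cases hmem : q.2 ∈ test
      · have hle : ¬ ((PySem.List.count l q.2 : Int) > m) := not_lt.mpr (hinv _ hmem)
        rw [if_pos hmem, if_neg hle]
        exact ih p m test (by intro x hx; exact hinv x hx)
      · rw [if_neg hmem]
        by_cases hgt : ((PySem.List.count l q.2 : Int) > m)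
        · rw [if_pos hgt, if_pos hgt]
          refine ih q.1 _ (test ++ [q.2]) ?_
          intro x hx
          rcases List.mem_append.mp hx with hx | hx
          · exact le_trans (hinv x hx) (le_of_lt hgt)
          · simp at hx; simp [hx]
        · rw [if_neg hgt, if_neg hgt]
          refine ih p m (test ++ [q.2]) ?_
          intro x hx
          rcases List.mem_append.mp hx with hx | hx
          · exact hinv x hx
          · simp at hx; subst hx; exact not_lt.mp hgt

-- main: the final position is the first index whose count equals the final max
lemma pvFold2_fst (l : List Int) (ps : List (Int × Int)) :
    ∀ (p m : Int),
      (pvMaxF l ps m > m → (pvFold2 l ps (p, m)).1 = pvFind l (pvMaxF l ps m) ps) ∧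
      (pvMaxF l ps m = m → (pvFold2 l ps (p, m)).1 = p) := by
  induction ps with
  | nil => intro p m; exact ⟨fun h => absurd h (by simp [pvMaxF]), fun _ => rfl⟩
  | cons q rest ih =>
      intro p m
      by_cases hq : pvCnt l q.2 > m
      · have hcons2 : pvFold2 l (q :: rest) (p, m) = pvFold2 l rest (q.1, pvCnt l q.2) := by
          simp [pvFold2, hq]
        have hM : pvMaxF l (q :: rest) m = pvMaxF l rest (pvCnt l q.2) := by
          simp [pvMaxF, hq]
        have hle := pvMaxF_le l rest (pvCnt l q.2)
        constructor
        · intro _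
          rw [hcons2, hM]
          rcases lt_or_eq_of_le hle with hlt | heq
          · rw [(ih q.1 (pvCnt l q.2)).1 hlt]
            simp [pvFind, ne_of_lt hlt]
          · rw [(ih q.1 (pvCnt l q.2)).2 heq.symm]
            simp [pvFind, ← heq]
        · intro hMm
          exfalso
          rw [hM] at hMm
          omega
      · have hcons2 : pvFold2 l (q :: rest) (p, m) = pvFold2 l rest (p, m) := by
          simp [pvFold2, hq]
        have hM : pvMaxF l (q :: rest) m = pvMaxF l rest m := by
          simp [pvMaxF, hq]
        constructor
        · intro hgt
          rw [hM] at hgt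
          rw [hcons2, hM, (ih p m).1 hgt]
          have : ¬ pvCnt l q.2 = pvMaxF l rest m := by omega
          simp [pvFind, this]
        · intro hMm
          rw [hM] at hMm
          rw [hcons2, (ih p m).2 hMm]

-- B's max pass over l equals the same fold over the enumerated pairs
lemma pvMaxF_eq_foldl (l0 : List Int) (l : List Int) :
    ∀ (s m : Int), pvMaxF l0 (PySem.List.enumerate l s) m
      = l.foldl (fun m x => if pvCnt l0 x > m then pvCnt l0 x else m) m := by
  induction l with
  | nil => intro s m; rfl
  | cons h t ih =>
      intro s m
      simp only [PySem.List.enumerate_cons, pvMaxF, List.foldl_cons] at *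
      exact ih (s + 1) _

lemma pvFoldMax_le (l0 : List Int) (xs : List Int) (m : Int) :
    m ≤ xs.foldl (fun m x => if pvCnt l0 x > m then pvCnt l0 x else m) m := by
  induction xs generalizing m with
  | nil => simp
  | cons x t ih =>
      simp only [List.foldl_cons]
      split_ifs with h
      · exact le_trans (le_of_lt h) (ih _)
      · exact ih m

lemma pvCnt_pos_head (h : Int) (t : List Int) : 0 < pvCnt (h :: t) h := by
  simp [pvCnt, PySem.List.count_eq]

-- ===== VERDICT (by name: the statement is the Claim_ definition above) =====
theorem positionMaxLenSerie_spec : Claim_equal_positionMaxLenSerie := by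
  intro l _
  unfold Spec_positionMaxLenSerie positionMaxLenSerie positionMaxLenSerie_alt
  rw [pvTestElim l (PySem.List.enumerate l) 0 0 [] (by intro x hx; cases hx)]
  rw [pvScanFirst_eq_pvFind]
  have hmax : (l.foldl
      (fun m x =>
        if (l.foldl (fun d x => d.insert x (d.getD x 0 + 1)) PySem.Dict.empty).getD x 0 > m
        then (l.foldl (fun d x => d.insert x (d.getD x 0 + 1)) PySem.Dict.empty).getD x 0
        else m) (0 : Int))
      = pvMaxF l (PySem.List.enumerate l) 0 := by
    rw [pvMaxF_eq_foldl]
    simp [PySem.Dict.getD_foldl_insert_add_one, pvCnt, PySem.List.count_eq]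
  rw [hmax]
  cases l with
  | nil => rfl
  | cons h t =>
      have hpos : pvMaxF (h :: t) (PySem.List.enumerate (h :: t)) 0 > 0 := by
        rw [pvMaxF_eq_foldl]
        have h1 : pvCnt (h :: t) h > 0 := pvCnt_pos_head h t
        simp only [List.foldl_cons]
        rw [if_pos h1]
        calc (0 : Int) < pvCnt (h :: t) h := h1
          _ ≤ _ := pvFoldMax_le _ _ _
      exact ((pvFold2_fst (h :: t) (PySem.List.enumerate (h :: t))) 0 0).1 hpos
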